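-- pv_equiv track=rewrite | github.com/bmweiner/racepace | racepace/convert.py | to_hms_text
-- ===== SOURCE A (Python) =====
-- def to_hms(s):
--     """Convert seconds to (h,m,s)."""
--     m, s = divmod(s, 60)
--     h, m = divmod(m, 60)
--     h = int(h)
--     m = int(m)
--     s = int(s)
--     return (h, m, s)
--
-- def to_hms_text(seconds):
--     text = ''
--     hms = to_hms(seconds)
--     labels = ('hour', 'minute', 'second')
--     items = [(val, lab) for val, lab in zip(hms, labels) if val > 0]
--     for i, (val, lab) in enumerate(items):
--         text += '{} {}'.format(val, lab)
--         if val > 1: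
--             text += 's'
--         if i != len(items) - 1:
--             if len(items) > 2:
--                 text += ', '
--             if len(items) == 2:
--                 text += ' and '
--             elif i == len(items) - 2:
--                 text += 'and '
--     return text
-- ===== SOURCE B (Python) =====
-- def to_hms(s):
--     """Convert seconds to (h,m,s)."""
--     m, s = divmod(s, 60)
--     h, m = divmod(m, 60)
--     h = int(h)
--     m = int(m)
--     s = int(s)
--     return (h, m, s)
--
-- def to_hms_text(seconds):
--     hms = to_hms(seconds)
--     labels = ('hour', 'minute', 'second')
--     parts = ['{} {}'.format(val, lab) + ('s' if val > 1 else '')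
--              for val, lab in zip(hms, labels) if val > 0]
--     if not parts:
--         return ''
--     if len(parts) == 1:
--         return parts[0]
--     if len(parts) == 2:
--         return parts[0] + ' and ' + parts[1]
--     return ', '.join(parts[:-1]) + ', and ' + parts[-1]
-- ===== Notes on version B (the rewrite author's own statement) =====
-- stated objective: idiomatic
-- what changed: B builds the list of formatted parts first and then joins them in one grammar step (empty/one/two/Oxford join) instead of A's single loop that decides the separator inline per index.
import Mathlib
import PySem

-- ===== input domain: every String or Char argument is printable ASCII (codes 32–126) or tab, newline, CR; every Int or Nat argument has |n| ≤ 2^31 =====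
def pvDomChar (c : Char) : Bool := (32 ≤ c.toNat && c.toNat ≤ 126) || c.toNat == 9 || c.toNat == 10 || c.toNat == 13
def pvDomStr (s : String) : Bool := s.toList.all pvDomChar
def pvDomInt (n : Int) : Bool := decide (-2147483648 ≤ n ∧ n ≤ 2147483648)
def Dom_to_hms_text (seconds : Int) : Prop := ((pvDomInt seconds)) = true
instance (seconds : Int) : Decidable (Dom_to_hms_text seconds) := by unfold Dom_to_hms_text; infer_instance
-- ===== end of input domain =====

-- B changes only the decomposition: build the parts, then join them in one grammar step (idiomatic; same cost).

-- ===== PORT A =====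
-- shared helper: both Source A and Source B contain the identical to_hms
def pv_to_hms (s : Int) : Int × Int × Int :=
  let m := PySem.Int.floordiv s 60
  let s := PySem.Int.mod s 60
  let h := PySem.Int.floordiv m 60
  let m := PySem.Int.mod m 60
  (h, m, s)

def to_hms_text (seconds : Int) : String :=
  let text : String := ""
  let hms := pv_to_hms seconds
  let labels : List String := ["hour", "minute", "second"]
  let items := (List.zip [hms.1, hms.2.1, hms.2.2] labels).filter (fun p => decide (p.1 > 0))
  (PySem.List.enumerate items).foldl (fun text (p : Int × Int × String) =>
    let i := p.1; let val := p.2.1; let lab := p.2.2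
    let text := text ++ PySem.Int.toStr val ++ " " ++ lab
    let text := if val > 1 then text ++ "s" else text
    if i ≠ (items.length : Int) - 1 then
      let text := if (items.length : Int) > 2 then text ++ ", " else text
      if (items.length : Int) = 2 then text ++ " and "
      else if i = (items.length : Int) - 2 then text ++ "and "
      else text
    else text) text

-- ===== PORT B =====
def to_hms_text_alt (seconds : Int) : String :=
  let hms := pv_to_hms seconds
  let labels : List String := ["hour", "minute", "second"]
  let parts := ((List.zip [hms.1, hms.2.1, hms.2.2] labels).filter (fun p => decide (p.1 > 0))).map
    (fun p => PySem.Int.toStr p.1 ++ " " ++ p.2 ++ (if p.1 > 1 then "s" else ""))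
  if parts = [] then ""
  else if parts.length = 1 then parts.headD ""
  else if parts.length = 2 then parts.headD "" ++ " and " ++ parts.getD 1 ""
  else PySem.Str.join ", " parts.dropLast ++ ", and " ++ parts.getLastD ""

-- ===== PRECONDITION & SPEC =====
def Spec_to_hms_text (seconds : Int) (out : String) : Prop := out = to_hms_text_alt seconds
instance (seconds : Int) (out : String) : Decidable (Spec_to_hms_text seconds out) := by unfold Spec_to_hms_text; infer_instance

-- ===== CLAIM (what is proved, stated in full; the proofs are below) =====
def Claim_equal_to_hms_text : Prop := ∀ (seconds : Int), Dom_to_hms_text seconds → Spec_to_hms_text seconds (to_hms_text seconds)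

-- ===== LEMMAS AND PROOFS =====

theorem pv_join_pair (a b : String) : PySem.Str.join ", " [a, b] = a ++ ", " ++ b := by
  have h : (PySem.Str.join ", " [a, b]).toList = (a ++ ", " ++ b).toList := by
    simp [PySem.Str.toList_join, PySem.Chars.join_cons_cons, PySem.Chars.join_singleton]
  exact String.toList_inj.mp h

theorem pv_key (h m s : Int) :
    ((PySem.List.enumerate ((List.zip [h, m, s] ["hour", "minute", "second"]).filter
        (fun p => decide (p.1 > 0)))).foldl (fun text (p : Int × Int × String) =>
      let i := p.1; let val := p.2.1; let lab := p.2.2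
      let text := text ++ PySem.Int.toStr val ++ " " ++ lab
      let text := if val > 1 then text ++ "s" else text
      let n := ((List.zip [h, m, s] ["hour", "minute", "second"]).filter
        (fun p => decide (p.1 > 0))).length
      if i ≠ (n : Int) - 1 then
        let text := if (n : Int) > 2 then text ++ ", " else text
        if (n : Int) = 2 then text ++ " and "
        else if i = (n : Int) - 2 then text ++ "and "
        else text
      else text) "") =
    (let parts := ((List.zip [h, m, s] ["hour", "minute", "second"]).filter
        (fun p => decide (p.1 > 0))).map
      (fun p => PySem.Int.toStr p.1 ++ " " ++ p.2 ++ (if p.1 > 1 then "s" else ""))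
     if parts = [] then ""
     else if parts.length = 1 then parts.headD ""
     else if parts.length = 2 then parts.headD "" ++ " and " ++ parts.getD 1 ""
     else PySem.Str.join ", " parts.dropLast ++ ", and " ++ parts.getLastD "") := by
  by_cases h1 : h > 0 <;> by_cases h2 : m > 0 <;> by_cases h3 : s > 0 <;>
    simp [h1, h2, h3, List.filter, PySem.List.enumerate, pv_join_pair,
          String.append_assoc] <;> split_ifs <;>
      (apply String.toList_inj.mp; simp [String.toList_append])

theorem to_hms_text_eq_alt (seconds : Int) : to_hms_text seconds = to_hms_text_alt seconds := by
  unfold to_hms_text to_hms_text_alt pv_to_hms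
  exact pv_key _ _ _

-- ===== VERDICT (by name: the statement is the Claim_ definition above) =====
theorem to_hms_text_spec : Claim_equal_to_hms_text :=
  fun seconds _ => to_hms_text_eq_alt seconds
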